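-- pv_equiv track=rewrite | github.com/zivelo1/CopperPilot | workflow/agents/validation_agent.py | _check_interface_signals
-- ===== SOURCE A (Python) =====
-- from typing import Dict, List, Any, Optional, Set
--
-- def _check_interface_signals(circuit: Dict, interface: Dict) -> List[Dict]:
--     """
--     Check that interface signals are properly exposed.
--
--     Args:
--         circuit: The circuit to check
--         interface: Interface contract
--
--     Returns:
--         List of interface signal issues
--     """
--     issues = []
--     pin_net_mapping = circuit.get('pinNetMapping', {})
--
--     # Get all nets in the circuit
--     circuit_nets = set(pin_net_mapping.values())
--
--     # Check output signals are exposed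
--     output_signals = interface.get('outputs', {})
--     if isinstance(output_signals, dict):
--         for signal_name in output_signals.keys():
--             # Check if signal exists as a net
--             found = any(signal_name.upper() in net.upper() for net in circuit_nets)
--             if not found:
--                 issues.append({
--                     'type': 'missing_interface_signal',
--                     'signal': signal_name,
--                     'severity': 'warning',
--                     'message': f'Interface output {signal_name} not found in circuit'
--                 })
--
--     return issues
-- ===== SOURCE B (Python) =====
-- def _check_interface_signals(circuit, interface):
--     """Flag interface output signals not substring-contained in any circuit net.
--
--     Nets-outer traversal: keep the not-yet-found signals (with their uppercased
--     form precomputed once) and strike them off while scanning each net once,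
--     stopping early when every signal has been found.
--     """
--     outputs = interface.get('outputs', {})
--     if not isinstance(outputs, dict):
--         return []
--     pending = [(name, name.upper()) for name in outputs]
--     for net in circuit.get('pinNetMapping', {}).values():
--         if not pending:
--             break
--         net_u = net.upper()
--         pending = [(name, sig) for (name, sig) in pending if sig not in net_u]
--     return [{
--         'type': 'missing_interface_signal',
--         'signal': name,
--         'severity': 'warning',
--         'message': f'Interface output {name} not found in circuit',
--     } for (name, _sig) in pending]
-- ===== Notes on version B (the rewrite author's own statement) =====
-- stated objective: alternative
-- what changed: Inverts the traversal: instead of scanning all nets per signal, B keeps a shrinking list of not-yet-found signals (uppercased once) and strikes them off while scanning the nets one pass outward, breaking early when all signals are found.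
import Mathlib
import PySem

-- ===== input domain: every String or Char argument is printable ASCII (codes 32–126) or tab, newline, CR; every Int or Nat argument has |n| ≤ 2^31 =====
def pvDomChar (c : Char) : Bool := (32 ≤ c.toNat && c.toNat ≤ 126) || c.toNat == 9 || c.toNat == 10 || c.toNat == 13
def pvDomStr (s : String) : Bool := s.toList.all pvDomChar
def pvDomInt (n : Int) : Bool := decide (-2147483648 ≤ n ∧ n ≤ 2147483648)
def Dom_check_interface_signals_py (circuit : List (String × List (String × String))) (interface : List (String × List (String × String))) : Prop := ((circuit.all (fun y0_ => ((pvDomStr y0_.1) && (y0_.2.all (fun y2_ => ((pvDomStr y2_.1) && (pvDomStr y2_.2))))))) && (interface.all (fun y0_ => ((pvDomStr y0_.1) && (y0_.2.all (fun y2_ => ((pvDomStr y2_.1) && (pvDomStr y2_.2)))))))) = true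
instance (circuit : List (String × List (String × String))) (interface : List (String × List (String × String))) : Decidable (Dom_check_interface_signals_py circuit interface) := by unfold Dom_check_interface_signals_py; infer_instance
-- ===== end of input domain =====

-- B inverts the traversal (nets-outer over a shrinking list of not-yet-found signals,
-- uppercased once, with an early break) instead of A's signals-outer scan over all nets;
-- objective: alternative structure, same worst-case cost.

-- the issue dict built for a missing signal (identical literal in both Pythons)
def pvIssue (name : String) : List (String × String) :=
  [("type", "missing_interface_signal"),
   ("signal", name),
   ("severity", "warning"),
   ("message", "Interface output " ++ name ++ " not found in circuit")]

-- ===== PORT A =====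
def check_interface_signals_py (circuit : List (String × List (String × String))) (interface : List (String × List (String × String))) : List (List (String × String)) :=
  let pin_net_mapping := PySem.Dict.getD (PySem.Dict.mk circuit) "pinNetMapping" []
  let circuit_nets : PySem.Set String := PySem.Set.ofList (pin_net_mapping.map (·.2))
  let output_signals := PySem.Dict.getD (PySem.Dict.mk interface) "outputs" []
  -- for signal_name in output_signals.keys(): append the issue when no net contains it
  output_signals.foldl (fun issues kv =>
    let signal_name := kv.1
    let found := circuit_nets.any (fun net =>
      PySem.Str.isIn (PySem.Str.upper signal_name) (PySem.Str.upper net))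
    if found then issues else issues ++ [pvIssue signal_name]) []

-- ===== PORT B =====
-- for net in …: pending = [p for p in pending if p.2 not in net.upper()], breaking when empty
def pvStrike (pending : List (String × String)) (nets : List String) : List (String × String) :=
  match nets with
  | [] => pending
  | net :: rest =>
    if pending.isEmpty then pending
    else pvStrike (pending.filter (fun p => !PySem.Str.isIn p.2 (PySem.Str.upper net))) rest

def check_interface_signals_py_alt (circuit : List (String × List (String × String))) (interface : List (String × List (String × String))) : List (List (String × String)) :=
  let outputs := PySem.Dict.getD (PySem.Dict.mk interface) "outputs" []
  let pending := outputs.map (fun kv => (kv.1, PySem.Str.upper kv.1))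
  let nets := (PySem.Dict.getD (PySem.Dict.mk circuit) "pinNetMapping" []).map (·.2)
  (pvStrike pending nets).map (fun p => pvIssue p.1)

-- ===== PRECONDITION & SPEC =====
def Spec_check_interface_signals_py (circuit : List (String × List (String × String))) (interface : List (String × List (String × String))) (out : List (List (String × String))) : Prop := out = check_interface_signals_py_alt circuit interface
instance (circuit : List (String × List (String × String))) (interface : List (String × List (String × String))) (out : List (List (String × String))) : Decidable (Spec_check_interface_signals_py circuit interface out) := by unfold Spec_check_interface_signals_py; infer_instance

-- ===== CLAIM (what is proved, stated in full; the proofs are below) =====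
def Claim_equal_check_interface_signals_py : Prop := ∀ (circuit : List (String × List (String × String))) (interface : List (String × List (String × String))), Dom_check_interface_signals_py circuit interface → Spec_check_interface_signals_py circuit interface (check_interface_signals_py circuit interface)

-- ===== LEMMAS AND PROOFS =====

-- A's accumulator loop is a filter-then-map
lemma pv_foldl_if_append {α β : Type} (p : α → Bool) (g : α → β) (l : List α) (init : List β) :
    l.foldl (fun acc x => if p x then acc else acc ++ [g x]) init
      = init ++ (l.filter (fun x => !p x)).map g := by
  induction l generalizing init with
  | nil => simp
  | cons x xs ih =>
    by_cases h : p x = true <;> simp [h, ih]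

-- B's strike loop is a single filter by "in no net"
lemma pvStrike_eq (pending : List (String × String)) (nets : List String) :
    pvStrike pending nets
      = pending.filter (fun p => nets.all (fun net => !PySem.Str.isIn p.2 (PySem.Str.upper net))) := by
  induction nets generalizing pending with
  | nil => simp [pvStrike]
  | cons net rest ih =>
    cases pending with
    | nil => simp [pvStrike]
    | cons q qs =>
      rw [pvStrike, if_neg (by simp), ih, List.filter_filter]
      apply List.filter_congr
      intro p _
      simp [Bool.and_comm]

-- any over set(...) equals any over the underlying list
lemma pv_set_any {α : Type} [BEq α] [LawfulBEq α] (l : List α) (f : α → Bool) :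
    (PySem.Set.ofList l).any f = l.any f := by
  cases hb : l.any f with
  | true =>
    rw [List.any_eq_true] at hb ⊢
    obtain ⟨x, hx, hf⟩ := hb
    exact ⟨x, (PySem.Set.mem_ofList l x).mpr hx, hf⟩
  | false =>
    rw [List.any_eq_false] at hb ⊢
    intro x hx
    exact hb x ((PySem.Set.mem_ofList l x).mp hx)

lemma pv_not_any {α : Type} (l : List α) (f : α → Bool) :
    (!l.any f) = l.all (fun x => !f x) := by
  induction l with
  | nil => simp
  | cons x xs ih => simp [ih]

-- ===== VERDICT (by name: the statement is the Claim_ definition above) =====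
theorem check_interface_signals_py_spec : Claim_equal_check_interface_signals_py := by
  intro circuit interface _
  show check_interface_signals_py circuit interface = check_interface_signals_py_alt circuit interface
  simp only [check_interface_signals_py, check_interface_signals_py_alt]
  rw [pv_foldl_if_append, pvStrike_eq, List.filter_map, List.map_map, List.nil_append]
  simp only [pv_set_any, pv_not_any]
  rfl
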